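-- pv_equiv track=rewrite | github.com/Puvshot/mcp-stage-server | mss/parsers/markdown.py | _extract_section_text
-- ===== SOURCE A (Python) =====
-- def _extract_section_text(lines: list[str], section_header: str, warnings: list[str]) -> str:
--     section_lines, found = _get_section_lines(lines, section_header)
--     if not found:
--         warnings.append(f"missing section: {section_header}")
--         return "UNKNOWN: section not found"
--
--     text_value = "\n".join(line.strip() for line in section_lines if line.strip())
--     if not text_value:
--         warnings.append(f"empty section: {section_header}")
--         return "UNKNOWN: section not found"
--
--     return text_value
--
-- def _get_section_lines(lines: list[str], section_header: str) -> tuple[list[str], bool]: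
--     start_index: int | None = None
--     for index, line in enumerate(lines):
--         if line.strip().lower() == section_header.lower():
--             start_index = index + 1
--             break
--
--     if start_index is None:
--         return [], False
--
--     collected_lines: list[str] = []
--     for line in lines[start_index:]:
--         if line.strip().startswith("## "):
--             break
--         collected_lines.append(line)
--
--     return collected_lines, True
-- ===== SOURCE B (Python) =====
-- def _extract_section_text(lines: list[str], section_header: str, warnings: list[str]) -> str:
--     target = section_header.lower()
--     found = False
--     collected: list[str] = []
--     for line in lines:
--         stripped = line.strip()
--         if not found:
--             if stripped.lower() == target:
--                 found = True
--         else: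
--             if stripped.startswith("## "):
--                 break
--             if stripped:
--                 collected.append(stripped)
--     if not found:
--         warnings.append(f"missing section: {section_header}")
--         return "UNKNOWN: section not found"
--     if not collected:
--         warnings.append(f"empty section: {section_header}")
--         return "UNKNOWN: section not found"
--     return "\n".join(collected)
-- ===== Notes on version B (the rewrite author's own statement) =====
-- stated objective: faster
-- what changed: B fuses A's three passes (index search, slice+collect of raw lines, strip/filter/join generator that strips each kept line twice) into one linear scan with a found flag that strips each line once and appends already-filtered lines, testing list emptiness instead of joined-string emptiness.
import Mathlib
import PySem

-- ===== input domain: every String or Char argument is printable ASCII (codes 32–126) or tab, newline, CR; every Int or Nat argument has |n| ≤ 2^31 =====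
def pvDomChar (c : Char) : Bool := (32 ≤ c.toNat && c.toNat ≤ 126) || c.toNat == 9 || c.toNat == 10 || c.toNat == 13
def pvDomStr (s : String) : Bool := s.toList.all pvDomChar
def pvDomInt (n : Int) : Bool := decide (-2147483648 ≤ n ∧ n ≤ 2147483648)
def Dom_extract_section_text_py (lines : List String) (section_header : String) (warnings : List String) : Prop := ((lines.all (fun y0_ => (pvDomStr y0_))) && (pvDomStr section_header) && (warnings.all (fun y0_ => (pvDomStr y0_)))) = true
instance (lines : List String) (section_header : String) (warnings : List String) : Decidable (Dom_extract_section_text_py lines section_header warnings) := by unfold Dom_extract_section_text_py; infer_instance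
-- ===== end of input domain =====

-- B fuses A's locate/collect/strip-filter-join passes into one flagged scan over the lines
-- (objective: faster, measured; constant-factor: one pass, each line stripped once). Both Pythons append the same warning strings to `warnings` (an
-- in-place mutation); the equivalence proved here is about the RETURN value only.

-- ===== PORT A =====
-- first loop of _get_section_lines: enumerate + break → recursion carrying the index
def pvFindStart (section_header : String) : List String → Nat → Option Nat
  | [], _ => none
  | line :: rest, index =>
    if PySem.Str.lower (PySem.Str.strip line) == PySem.Str.lower section_header then
      some (index + 1)
    else pvFindStart section_header rest (index + 1)

-- second loop of _get_section_lines: collect until a '## ' header, break → recursion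
def pvCollectLines : List String → List String
  | [] => []
  | line :: rest =>
    if PySem.Str.startswith (PySem.Str.strip line) "## " then []
    else line :: pvCollectLines rest

def pvGetSectionLines (lines : List String) (section_header : String) : List String × Bool :=
  match pvFindStart section_header lines 0 with
  | none => ([], false)
  | some start_index =>
      (pvCollectLines (PySem.List.slice lines (some (start_index : Int)) none), true)

def extract_section_text_py (lines : List String) (section_header : String) (_warnings : List String) : String :=
  let r := pvGetSectionLines lines section_header
  if !r.2 then "UNKNOWN: section not found"
  else
    let text_value := PySem.Str.join "\n"
      (r.1.filterMap (fun line =>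
        if PySem.Str.strip line == "" then none else some (PySem.Str.strip line)))
    if text_value == "" then "UNKNOWN: section not found"
    else text_value

-- ===== PORT B =====
-- the single for-loop of B (break → recursion on the list, state = found flag + collected)
def pvScan (target : String) : List String → Bool → List String → Bool × List String
  | [], found, collected => (found, collected)
  | line :: rest, found, collected =>
    let stripped := PySem.Str.strip line
    if !found then
      if PySem.Str.lower stripped == target then pvScan target rest true collected
      else pvScan target rest false collected
    else if PySem.Str.startswith stripped "## " then (found, collected)
    else if stripped == "" then pvScan target rest found collected
    else pvScan target rest found (collected ++ [stripped])

def extract_section_text_py_alt (lines : List String) (section_header : String) (_warnings : List String) : String :=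
  let r := pvScan (PySem.Str.lower section_header) lines false []
  if !r.1 then "UNKNOWN: section not found"
  else if r.2 == ([] : List String) then "UNKNOWN: section not found"
  else PySem.Str.join "\n" r.2

-- ===== PRECONDITION & SPEC =====
def Spec_extract_section_text_py (lines : List String) (section_header : String) (warnings : List String) (out : String) : Prop := out = extract_section_text_py_alt lines section_header warnings
instance (lines : List String) (section_header : String) (warnings : List String) (out : String) : Decidable (Spec_extract_section_text_py lines section_header warnings out) := by unfold Spec_extract_section_text_py; infer_instance

-- ===== CLAIM (what is proved, stated in full; the proofs are below) =====
def Claim_equal_extract_section_text_py : Prop := ∀ (lines : List String) (section_header : String) (warnings : List String), Dom_extract_section_text_py lines section_header warnings → Spec_extract_section_text_py lines section_header warnings (extract_section_text_py lines section_header warnings)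

-- ===== LEMMAS AND PROOFS =====

-- A's strip/filter generator, as a named function for the proofs
def pvStrips (ls : List String) : List String :=
  ls.filterMap (fun line =>
    if PySem.Str.strip line == "" then none else some (PySem.Str.strip line))

theorem pvStrips_ne_empty (ls : List String) : ∀ x ∈ pvStrips ls, x ≠ "" := by
  intro x hx
  simp only [pvStrips, List.mem_filterMap] at hx
  obtain ⟨a, _, ha⟩ := hx
  split at ha
  · exact absurd ha (by simp)
  · rename_i h
    cases ha
    exact fun he => h (by simp [he])

theorem pvScan_found (target : String) (ls acc : List String) :
    pvScan target ls true acc = (true, acc ++ pvStrips (pvCollectLines ls)) := by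
  induction ls generalizing acc with
  | nil => simp [pvScan, pvCollectLines, pvStrips]
  | cons l rest ih =>
    simp only [pvScan, pvCollectLines, Bool.not_true, Bool.false_eq_true, if_false]
    split_ifs with hstop hemp
    · simp [pvStrips]
    · rw [ih]
      rw [beq_iff_eq] at hemp
      simp [pvStrips, hemp]
    · rw [ih]
      rw [beq_iff_eq] at hemp
      simp [pvStrips, hemp]

theorem pvFindStart_shift (h : String) (ls : List String) (i : Nat) :
    pvFindStart h ls i = (pvFindStart h ls 0).map (· + i) := by
  induction ls generalizing i with
  | nil => simp [pvFindStart]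
  | cons l rest ih =>
    simp only [pvFindStart]
    split_ifs with hm
    · simp [Nat.add_comm]
    · rw [ih (i + 1), ih 1]
      cases pvFindStart h rest 0 with
      | none => simp
      | some k => simp; omega

theorem pvScan_eq_find (h : String) (ls : List String) :
    pvScan (PySem.Str.lower h) ls false [] =
      match pvFindStart h ls 0 with
      | none => (false, [])
      | some s => (true, pvStrips (pvCollectLines (ls.drop s))) := by
  induction ls with
  | nil => simp [pvScan, pvFindStart]
  | cons l rest ih =>
    simp only [pvFindStart, pvScan, Bool.not_false, if_true]
    split_ifs with hm
    · rw [pvScan_found]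
      simp
    · rw [ih, pvFindStart_shift h rest 1]
      cases pvFindStart h rest 0 <;> simp

theorem pv_toList_ne_nil {s : String} (hs : s ≠ "") : s.toList ≠ [] := by
  intro h
  exact hs (String.toList_inj.mp (by simpa using h))

theorem pvJoin_ne_empty (x : String) (xs : List String) (hx : x ≠ "") :
    (PySem.Str.join "\n" (x :: xs) == "") = false := by
  rw [beq_eq_false_iff_ne]
  intro hj
  have ht : (PySem.Str.join "\n" (x :: xs)).toList = [] := by rw [hj]; simp
  rw [PySem.Str.toList_join] at ht
  cases xs with
  | nil =>
    rw [List.map_cons, List.map_nil, PySem.Chars.join_singleton] at ht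
    exact pv_toList_ne_nil hx ht
  | cons y ys =>
    rw [List.map_cons, List.map_cons, PySem.Chars.join_cons_cons] at ht
    simp at ht

-- ===== VERDICT (by name: the statement is the Claim_ definition above) =====
theorem extract_section_text_py_spec : Claim_equal_extract_section_text_py := by
  intro lines section_header warnings _dom
  unfold Spec_extract_section_text_py extract_section_text_py extract_section_text_py_alt
  rw [pvScan_eq_find]
  cases hf : pvFindStart section_header lines 0 with
  | none =>
    have hg : pvGetSectionLines lines section_header = ([], false) := by
      unfold pvGetSectionLines; rw [hf]
    rw [hg]
    simp
  | some s =>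
    have hg : pvGetSectionLines lines section_header
        = (pvCollectLines (lines.drop s), true) := by
      unfold pvGetSectionLines; rw [hf]; simp [PySem.List.slice_from_natCast]
    rw [hg]
    simp only [Bool.not_true, Bool.false_eq_true, if_false]
    cases hxs : pvStrips (pvCollectLines (lines.drop s)) with
    | nil =>
      simp only [pvStrips] at hxs
      rw [hxs]
      simp
      decide
    | cons x xs =>
      have hx : x ≠ "" := pvStrips_ne_empty _ x (by rw [hxs]; exact List.mem_cons_self ..)
      simp only [pvStrips] at hxs
      rw [hxs, pvJoin_ne_empty x xs hx]
      simp
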